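-- pv_equiv track=rewrite | github.com/kkers42/contractor-portal | app/utils/customer_id_generator.py | validate_customer_id
-- ===== SOURCE A (Python) =====
-- SAFE_CHARS = 'ABCDEFGHJKMNPQRSTUVWXYZ23456789'
--
-- def validate_customer_id(customer_id: str) -> bool:
--     """
--     Validate that a customer_id meets format requirements.
--
--     Args:
--         customer_id: The customer ID to validate
--
--     Returns:
--         bool: True if valid, False otherwise
--     """
--     if not customer_id:
--         return False
--
--     if len(customer_id) != 9:
--         return False
--
--     if not all(c in SAFE_CHARS for c in customer_id):
--         return False
--
--     return True
-- ===== SOURCE B (Python) =====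
-- import re
--
-- _CUSTOMER_ID_RE = re.compile(r'[ABCDEFGHJKMNPQRSTUVWXYZ23456789]{9}')
--
-- def validate_customer_id(customer_id: str) -> bool:
--     if not customer_id:
--         return False
--     return _CUSTOMER_ID_RE.fullmatch(customer_id) is not None
-- ===== Notes on version B (the rewrite author's own statement) =====
-- stated objective: idiomatic
-- what changed: Replaces the separate length check and per-character membership comprehension with a single precompiled regex fullmatch ([SAFE]{9}), one matching pass enforcing both length and charset.
import Mathlib
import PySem

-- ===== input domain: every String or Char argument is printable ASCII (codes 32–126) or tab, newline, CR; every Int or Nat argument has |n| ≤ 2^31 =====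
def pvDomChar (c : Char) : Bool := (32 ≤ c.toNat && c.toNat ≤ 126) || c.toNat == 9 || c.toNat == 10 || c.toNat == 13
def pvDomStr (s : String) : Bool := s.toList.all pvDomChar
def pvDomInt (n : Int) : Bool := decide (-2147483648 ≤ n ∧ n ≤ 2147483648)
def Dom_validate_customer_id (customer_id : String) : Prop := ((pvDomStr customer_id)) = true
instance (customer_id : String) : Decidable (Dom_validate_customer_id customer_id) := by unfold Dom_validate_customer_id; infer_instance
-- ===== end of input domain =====

-- B replaces the separate length check and per-character membership comprehension with a
-- single regex fullmatch ([SAFE]{9}); one matching pass enforces both length and charset.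

-- ===== PORT A =====
def SAFE_CHARS : String := "ABCDEFGHJKMNPQRSTUVWXYZ23456789"

def validate_customer_id (customer_id : String) : Bool :=
  if customer_id.toList = [] then false
  else if customer_id.toList.length ≠ 9 then false
  else if ¬ (customer_id.toList.all (fun c => SAFE_CHARS.toList.contains c)) then false
  else true

-- ===== PORT B =====
-- the regex character class [ABCDEFGHJKMNPQRSTUVWXYZ23456789]
def pvClassChar (c : Char) : Bool :=
  ('A' ≤ c && c ≤ 'Z' && c ≠ 'I' && c ≠ 'L' && c ≠ 'O') || ('2' ≤ c && c ≤ '9')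

-- fullmatch of [class]{n} against the character list: consume exactly n class characters
def pvFullmatchRep (n : Nat) (cs : List Char) : Bool :=
  match n, cs with
  | 0, [] => true
  | 0, _ :: _ => false
  | _ + 1, [] => false
  | n + 1, c :: rest => pvClassChar c && pvFullmatchRep n rest

def validate_customer_id_alt (customer_id : String) : Bool :=
  if customer_id.toList = [] then false
  else pvFullmatchRep 9 customer_id.toList

-- ===== PRECONDITION & SPEC =====
def Spec_validate_customer_id (customer_id : String) (out : Bool) : Prop := out = validate_customer_id_alt customer_id
instance (customer_id : String) (out : Bool) : Decidable (Spec_validate_customer_id customer_id out) := by unfold Spec_validate_customer_id; infer_instance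

-- ===== CLAIM (what is proved, stated in full; the proofs are below) =====
def Claim_equal_validate_customer_id : Prop := ∀ (customer_id : String), Dom_validate_customer_id customer_id → Spec_validate_customer_id customer_id (validate_customer_id customer_id)

-- ===== LEMMAS AND PROOFS =====

-- the regex class and the SAFE_CHARS membership test agree on every character
theorem classChar_eq_contains (c : Char) :
    pvClassChar c = SAFE_CHARS.toList.contains c := by
  apply Bool.eq_iff_iff.mpr
  simp [pvClassChar, SAFE_CHARS, Char.le_def, UInt32.le_iff_toNat_le, Char.ext_iff,
    ← UInt32.toNat_inj]
  omega

-- the repetition matcher = length-check plus all-characters-in-class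
theorem fullmatchRep_eq (n : Nat) (cs : List Char) :
    pvFullmatchRep n cs = ((cs.length == n) && cs.all pvClassChar) := by
  induction n generalizing cs with
  | zero => cases cs <;> simp [pvFullmatchRep]
  | succ n ih =>
    cases cs with
    | nil => simp [pvFullmatchRep]
    | cons c rest =>
      simp [pvFullmatchRep, ih, List.all_cons, Bool.and_comm, Bool.and_assoc]

-- ===== VERDICT (by name: the statement is the Claim_ definition above) =====
theorem validate_customer_id_spec : Claim_equal_validate_customer_id := by
  intro s _
  unfold Spec_validate_customer_id validate_customer_id validate_customer_id_alt
  rw [fullmatchRep_eq]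
  rw [show pvClassChar = (fun c => SAFE_CHARS.toList.contains c) from funext classChar_eq_contains]
  split_ifs with h1 h2 h3 <;> simp_all
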